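-- pv_equiv track=rewrite | github.com/SuperMuel/BenchMac | analysis/analysis.py | filter_patch_excluding_lockfiles
-- ===== SOURCE A (Python) =====
-- def filter_patch_excluding_lockfiles(patch_text: str) -> str:
--     """Remove unified diff sections for common lockfiles to save space.
--
--     Skips sections where target path ends with:
--     - package-lock.json
--     - yarn.lock
--     - pnpm-lock.yaml
--     - bun.lockb
--     """
--     if not patch_text:
--         return patch_text
--
--     lines = patch_text.splitlines()
--     if not lines:
--         return patch_text
--
--     lockfile_suffixes = (
--         "package-lock.json",
--         "yarn.lock",
--         "pnpm-lock.yaml",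
--         "bun.lockb",
--     )
--
--     filtered: list[str] = []
--     include_current = True
--     in_any_section = False
--
--     for line in lines:
--         if line.startswith("diff --git "):
--             in_any_section = True
--             parts = line.split()
--             # Expected: ['diff', '--git', 'a/path', 'b/path']
--             path_b = parts[3] if len(parts) >= 4 else ""
--             if path_b.startswith("b/"):
--                 path_b = path_b[2:]
--             include_current = not any(path_b.endswith(suf) for suf in lockfile_suffixes)
--             if include_current:
--                 filtered.append(line)
--             continue
--
--         if not in_any_section:
--             # Keep any preamble before first 'diff --git'
--             filtered.append(line)
--             continue
--
--         if include_current: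
--             filtered.append(line)
--
--     return "\n".join(filtered)
-- ===== SOURCE B (Python) =====
-- def filter_patch_excluding_lockfiles(patch_text: str) -> str:
--     if not patch_text:
--         return patch_text
--     lines = patch_text.splitlines()
--     if not lines:
--         return patch_text
--
--     def is_header(ln):
--         return ln.startswith("diff --git ")
--
--     def keep(header):
--         parts = header.split()
--         path_b = parts[3] if len(parts) >= 4 else ""
--         if path_b.startswith("b/"):
--             path_b = path_b[2:]
--         return not path_b.endswith(
--             ("package-lock.json", "yarn.lock", "pnpm-lock.yaml", "bun.lockb")
--         )
--
--     n = len(lines)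
--     # preamble: everything before the first section header
--     k = 0
--     while k < n and not is_header(lines[k]):
--         k += 1
--     out = lines[:k]
--     # sections: each starts at a header line and runs to the next header
--     i = k
--     while i < n:
--         j = i + 1
--         while j < n and not is_header(lines[j]):
--             j += 1
--         if keep(lines[i]):
--             out.extend(lines[i : j])
--         i = j
--     return "\n".join(out)
-- ===== Notes on version B (the rewrite author's own statement) =====
-- stated objective: alternative
-- what changed: Replaces A's single pass driven by include_current/in_any_section boolean flags with a segment decomposition: find the preamble and each header-delimited section as index slices, keep or drop each section whole by parsing its header, then join the surviving slices.
import Mathlib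
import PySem

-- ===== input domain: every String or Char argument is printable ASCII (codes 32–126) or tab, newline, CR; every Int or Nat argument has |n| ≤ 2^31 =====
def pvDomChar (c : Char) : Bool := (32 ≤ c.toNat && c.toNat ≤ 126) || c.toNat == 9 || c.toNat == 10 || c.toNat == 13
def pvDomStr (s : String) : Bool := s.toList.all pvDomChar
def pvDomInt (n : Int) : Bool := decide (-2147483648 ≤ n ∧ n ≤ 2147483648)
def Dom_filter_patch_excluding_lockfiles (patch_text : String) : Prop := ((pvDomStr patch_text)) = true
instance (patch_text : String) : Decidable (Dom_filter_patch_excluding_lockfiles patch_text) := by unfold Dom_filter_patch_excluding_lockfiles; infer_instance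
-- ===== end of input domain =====

-- B replaces A's one-pass flag machine (include_current / in_any_section) by a segment
-- decomposition: preamble before the first header, then header-delimited slices kept or
-- dropped whole; objective: alternative (same cost, different structure).

-- ===== PORT A =====
-- loop state: (filtered, include_current, in_any_section)
def pvA_step (st : List String × Bool × Bool) (line : String) : List String × Bool × Bool :=
  let filtered := st.1
  let include_current := st.2.1
  let in_any_section := st.2.2
  if PySem.Str.startswith line "diff --git " then
    let parts := PySem.Str.split₀ line
    let path_b := if parts.length ≥ 4 then parts.getD 3 "" else ""
    let path_b := if PySem.Str.startswith path_b "b/" then PySem.Str.slice path_b (some 2) none else path_b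
    let inc := ! (["package-lock.json", "yarn.lock", "pnpm-lock.yaml", "bun.lockb"].any
                    (fun suf => PySem.Str.endswith path_b suf))
    (if inc then filtered ++ [line] else filtered, inc, true)
  else if ! in_any_section then
    (filtered ++ [line], include_current, in_any_section)
  else if include_current then
    (filtered ++ [line], include_current, in_any_section)
  else
    (filtered, include_current, in_any_section)

def filter_patch_excluding_lockfiles (patch_text : String) : String :=
  if patch_text = "" then patch_text
  else
    let lines := PySem.Str.splitlines patch_text
    if lines = [] then patch_text
    else
      (lines.foldl pvA_step ([], true, false)).1 |> PySem.Str.join "\n"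

-- ===== PORT B =====
def pvB_is_header (line : String) : Bool := PySem.Str.startswith line "diff --git "

def pvB_keep (header : String) : Bool :=
  let parts := PySem.Str.split₀ header
  let path_b := if parts.length ≥ 4 then parts.getD 3 "" else ""
  let path_b := if PySem.Str.startswith path_b "b/" then PySem.Str.slice path_b (some 2) none else path_b
  ! (["package-lock.json", "yarn.lock", "pnpm-lock.yaml", "bun.lockb"].any
       (fun suf => PySem.Str.endswith path_b suf))

-- sections: each starts at a header line and runs to the next header; kept or dropped whole
-- (generic in the two predicates so Lean can generate the recursion equations)
def pvB_sectionsGen (keep hdr : String → Bool) : List String → List String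
  | [] => []
  | h :: rest =>
    let body := rest.takeWhile (fun l => ! hdr l)
    let rest' := rest.dropWhile (fun l => ! hdr l)
    (if keep h then h :: body else []) ++ pvB_sectionsGen keep hdr rest'
termination_by l => l.length
decreasing_by
  simpa using Nat.lt_succ_of_le (List.length_dropWhile_le _ _)

def pvB_sections : List String → List String := pvB_sectionsGen pvB_keep pvB_is_header

def filter_patch_excluding_lockfiles_alt (patch_text : String) : String :=
  if patch_text = "" then patch_text
  else
    let lines := PySem.Str.splitlines patch_text
    if lines = [] then patch_text
    else
      let pre := lines.takeWhile (fun l => ! pvB_is_header l)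
      let rest := lines.dropWhile (fun l => ! pvB_is_header l)
      PySem.Str.join "\n" (pre ++ pvB_sections rest)

-- ===== PRECONDITION & SPEC =====
def Spec_filter_patch_excluding_lockfiles (patch_text : String) (out : String) : Prop := out = filter_patch_excluding_lockfiles_alt patch_text
instance (patch_text : String) (out : String) : Decidable (Spec_filter_patch_excluding_lockfiles patch_text out) := by unfold Spec_filter_patch_excluding_lockfiles; infer_instance

-- ===== CLAIM (what is proved, stated in full; the proofs are below) =====
def Claim_equal_filter_patch_excluding_lockfiles : Prop := ∀ (patch_text : String), Dom_filter_patch_excluding_lockfiles patch_text → Spec_filter_patch_excluding_lockfiles patch_text (filter_patch_excluding_lockfiles patch_text)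

-- ===== LEMMAS AND PROOFS =====

theorem pvB_sections_nil : pvB_sections [] = [] := by
  rw [pvB_sections, pvB_sectionsGen.eq_1]

theorem pvB_sections_cons (h : String) (rest : List String) :
    pvB_sections (h :: rest) =
      (if pvB_keep h then h :: rest.takeWhile (fun l => ! pvB_is_header l) else []) ++
        pvB_sections (rest.dropWhile (fun l => ! pvB_is_header l)) := by
  rw [pvB_sections, pvB_sectionsGen.eq_2]

-- recursive characterisation of A's loop (state-threaded)
def pvGoA : List String → Bool → Bool → List String
  | [], _, _ => []
  | l :: ls, inc, inAny =>
    if pvB_is_header l then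
      (if pvB_keep l then [l] else []) ++ pvGoA ls (pvB_keep l) true
    else if ! inAny then l :: pvGoA ls inc inAny
    else if inc then l :: pvGoA ls inc inAny
    else pvGoA ls inc inAny

theorem pvA_foldl_eq (lines : List String) (acc : List String) (inc inAny : Bool) :
    (lines.foldl pvA_step (acc, inc, inAny)).1 = acc ++ pvGoA lines inc inAny := by
  induction lines generalizing acc inc inAny with
  | nil => simp [pvGoA]
  | cons l ls ih =>
    simp only [List.foldl_cons, pvGoA]
    by_cases hh : pvB_is_header l
    · have : pvA_step (acc, inc, inAny) l =
          (if pvB_keep l then acc ++ [l] else acc, pvB_keep l, true) := by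
        simp [pvA_step, pvB_keep, pvB_is_header] at hh ⊢
        simp [hh]
      rw [this, ih, hh]
      by_cases hk : pvB_keep l <;> simp [hk]
    · have hstep : pvA_step (acc, inc, inAny) l =
          (if (!inAny) || inc then acc ++ [l] else acc, inc, inAny) := by
        simp [pvA_step, pvB_is_header] at hh ⊢
        simp [hh]
        cases inAny <;> cases inc <;> simp
      rw [hstep, ih]
      simp [hh]
      cases inAny <;> cases inc <;> simp

-- inside a section (in_any_section = true): kept iff include flag, until the next header
theorem pvGoA_in_section (ls : List String) (inc : Bool) :
    pvGoA ls inc true =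
      (if inc then ls.takeWhile (fun l => ! pvB_is_header l) else []) ++
        pvB_sections (ls.dropWhile (fun l => ! pvB_is_header l)) := by
  induction ls generalizing inc with
  | nil => cases inc <;> simp [pvGoA, pvB_sections_nil]
  | cons l ls ih =>
    by_cases hh : pvB_is_header l
    · have ht : List.takeWhile (fun l => !pvB_is_header l) (l :: ls) = [] := by simp [hh]
      have hd : List.dropWhile (fun l => !pvB_is_header l) (l :: ls) = l :: ls := by simp [hh]
      rw [pvGoA, ht, hd, pvB_sections_cons]
      simp [hh]
      by_cases hk : pvB_keep l <;> simp [hk, ih]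
    · rw [pvGoA]
      simp [hh]
      cases inc <;> simp [ih]

-- the preamble (in_any_section = false): every line kept until the first header
theorem pvGoA_preamble (ls : List String) :
    pvGoA ls true false =
      ls.takeWhile (fun l => ! pvB_is_header l) ++
        pvB_sections (ls.dropWhile (fun l => ! pvB_is_header l)) := by
  induction ls with
  | nil => simp [pvGoA, pvB_sections_nil]
  | cons l ls ih =>
    by_cases hh : pvB_is_header l
    · have ht : List.takeWhile (fun l => !pvB_is_header l) (l :: ls) = [] := by simp [hh]
      have hd : List.dropWhile (fun l => !pvB_is_header l) (l :: ls) = l :: ls := by simp [hh]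
      rw [pvGoA, ht, hd, pvB_sections_cons]
      simp [hh]
      by_cases hk : pvB_keep l <;> simp [hk, pvGoA_in_section]
    · rw [pvGoA]
      simp [hh, ih]

-- ===== VERDICT (by name: the statement is the Claim_ definition above) =====
theorem filter_patch_excluding_lockfiles_spec : Claim_equal_filter_patch_excluding_lockfiles := by
  intro patch_text _
  unfold Spec_filter_patch_excluding_lockfiles
  unfold filter_patch_excluding_lockfiles filter_patch_excluding_lockfiles_alt
  by_cases he : patch_text = ""
  · simp [he]
  · simp only [he, if_false]
    by_cases hl : PySem.Str.splitlines patch_text = []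
    · simp [hl]
    · simp only [hl, if_false]
      rw [pvA_foldl_eq, pvGoA_preamble]
      simp
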